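-- pv_equiv track=rewrite | github.com/sydneyrenee/ASTDistance | python/ast_distance/ast_parser.py | comment_has_stub_markers
-- ===== SOURCE A (Python) =====
-- def comment_has_stub_markers(text: str) -> bool:
--     """For comment nodes, be stricter: only treat as stub when comment
--     itself starts with TODO/FIXME/STUB.
--
--     Faithful transliteration from ast_parser.hpp:595-600+.
--     """
--     lower = text.lower()
--
--     i = 0
--     if lower.startswith("//"):
--         i = 2
--         while i < len(lower) and lower[i] == "/":
--             i += 1
--     elif lower.startswith("#"):
--         i = 1
--         while i < len(lower) and lower[i] == "#":
--             i += 1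
--     elif lower.startswith("/*"):
--         i = 2
--         if i < len(lower) and lower[i] == "*":
--             i += 1
--
--     while i < len(lower) and lower[i].isspace():
--         i += 1
--     while i < len(lower) and lower[i] == "*":
--         i += 1
--         while i < len(lower) and lower[i].isspace():
--             i += 1
--
--     def is_word(ch: str) -> bool:
--         return ch.isalnum() or ch == "_"
--
--     def starts_with_word(word: str) -> bool:
--         if not lower.startswith(word, i):
--             return False
--         end = i + len(word)
--         if end >= len(lower):
--             return True
--         return not is_word(lower[end])
--
--     if (
--         starts_with_word("todo")
--         or starts_with_word("fixme")
--         or starts_with_word("stub")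
--         or starts_with_word("placeholder")
--         or starts_with_word("unimplemented")
--         or starts_with_word("notimplemented")
--     ):
--         return True
--
--     if lower.startswith("not implemented", i) or lower.startswith("not yet implemented", i):
--         return True
--
--     return False
-- ===== SOURCE B (Python) =====
-- _WORDS = ("todo", "fixme", "stub", "placeholder", "unimplemented", "notimplemented")
-- _PHRASES = ("not implemented", "not yet implemented")
--
--
-- def comment_has_stub_markers(text: str) -> bool:
--     """Search-then-validate: find each keyword occurrence in the lowered text and
--     accept it iff everything before it is exactly a comment marker plus
--     whitespace/'*' decoration (a full-match prefix check).  Correct because every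
--     keyword starts with a letter, which can never occur inside a valid prefix."""
--     s = text.lower()
--
--     def prefix_ok(j: int) -> bool:
--         p = s[:j]
--         if p[:2] == "//":
--             body = p[2:].lstrip("/")
--         elif p[:1] == "#":
--             body = p[1:].lstrip("#")
--         elif p[:2] == "/*":
--             body = p[2:]
--         else:
--             body = p
--         return all(c == "*" or c.isspace() for c in body)
--
--     def occurrences(w):
--         j = s.find(w)
--         while j != -1:
--             yield j
--             j = s.find(w, j + 1)
--
--     for w in _WORDS:
--         for j in occurrences(w):
--             e = j + len(w)
--             if (e >= len(s) or not (s[e].isalnum() or s[e] == "_")) and prefix_ok(j):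
--                 return True
--     for w in _PHRASES:
--         for j in occurrences(w):
--             if prefix_ok(j):
--                 return True
--     return False
-- ===== Notes on version B (the rewrite author's own statement) =====
-- stated objective: alternative
-- what changed: B inverts the control flow: instead of stripping the comment marker/decoration forward and testing keywords at the single resulting position, it searches the lowered text for every occurrence of each keyword and accepts one iff the whole text before it full-matches the marker-plus-decoration prefix language; this is correct because keywords start with letters, which cannot occur inside such a prefix, so a validated occurrence sits exactly at A's strip point.
import Mathlib
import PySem

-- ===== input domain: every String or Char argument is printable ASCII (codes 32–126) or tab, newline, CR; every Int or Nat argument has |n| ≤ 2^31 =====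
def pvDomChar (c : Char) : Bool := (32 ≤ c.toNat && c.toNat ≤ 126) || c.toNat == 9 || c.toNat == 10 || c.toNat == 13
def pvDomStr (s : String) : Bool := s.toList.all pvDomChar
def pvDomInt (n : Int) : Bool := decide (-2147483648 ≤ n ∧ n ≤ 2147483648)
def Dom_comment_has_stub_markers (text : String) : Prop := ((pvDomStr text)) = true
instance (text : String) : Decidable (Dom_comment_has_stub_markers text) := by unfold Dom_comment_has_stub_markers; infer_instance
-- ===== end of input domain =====

-- B inverts the control flow: it searches for each keyword occurrence and validates
-- the text before it as a full marker+decoration prefix, instead of stripping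
-- forward and testing keywords at one position; same result, alternative algorithm.

-- ===== PORT A =====
-- ch.isalnum() or ch == "_"
def pvIsWordA (c : Char) : Bool := PySem.Chars.isalnum c || c == '_'

-- while i < len(lower) and p(lower[i]): i += 1
def pvSkipA (p : Char → Bool) (l : List Char) (i : Nat) : Nat :=
  if h : i < l.length then
    if p l[i] then pvSkipA p l (i + 1) else i
  else i
termination_by l.length - i

theorem pvSkipA_le (p : Char → Bool) (l : List Char) (i : Nat) : i ≤ pvSkipA p l i := by
  unfold pvSkipA
  split
  · split
    · have := pvSkipA_le p l (i + 1)
      omega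
    · exact Nat.le_refl i
  · exact Nat.le_refl i
termination_by l.length - i

-- while i < len(lower) and lower[i] == "*": i += 1; while … isspace: i += 1
def pvStarA (l : List Char) (i : Nat) : Nat :=
  if h : i < l.length then
    if l[i] == '*' then pvStarA l (pvSkipA PySem.Chars.isspace l (i + 1)) else i
  else i
termination_by l.length - i
decreasing_by
  have := pvSkipA_le PySem.Chars.isspace l (i + 1)
  omega

-- the marker-stripping if/elif chain of A (computes the i after the marker loops)
def pvMarkerA (l : List Char) : Nat :=
  if ['/', '/'].isPrefixOf l then pvSkipA (fun c => c == '/') l 2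
  else if ['#'].isPrefixOf l then pvSkipA (fun c => c == '#') l 1
  else if ['/', '*'].isPrefixOf l then
    (if h : 2 < l.length then (if l[2] == '*' then 3 else 2) else 2)
  else 0

-- A's whole stripping phase: marker, whitespace, then the star/whitespace loop
def pvStripA (l : List Char) : Nat := pvStarA l (pvSkipA PySem.Chars.isspace l (pvMarkerA l))

-- def starts_with_word(word): startswith at i, then boundary check on lower[end]
def pvStartsWithWordA (l : List Char) (i : Nat) (w : List Char) : Bool :=
  if w.isPrefixOf (l.drop i) then
    match l.drop (i + w.length) with
    | [] => true
    | c :: _ => !pvIsWordA c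
  else false

def comment_has_stub_markers (text : String) : Bool :=
  let lower := PySem.Chars.lower text.toList
  let i := pvStripA lower
  if (pvStartsWithWordA lower i "todo".toList
      || pvStartsWithWordA lower i "fixme".toList
      || pvStartsWithWordA lower i "stub".toList
      || pvStartsWithWordA lower i "placeholder".toList
      || pvStartsWithWordA lower i "unimplemented".toList
      || pvStartsWithWordA lower i "notimplemented".toList) then true
  else if ("not implemented".toList.isPrefixOf (lower.drop i)
      || "not yet implemented".toList.isPrefixOf (lower.drop i)) then true
  else false

-- ===== PORT B =====
-- c == "*" or c.isspace()
def pvDecorB (c : Char) : Bool := c == '*' || PySem.Chars.isspace c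

-- prefix_ok: p must be a comment marker followed only by whitespace/'*' decoration
def pvValidPrefixB (p : List Char) : Bool :=
  let body :=
    if ['/', '/'].isPrefixOf p then (p.drop 2).dropWhile (fun c => c == '/')
    else if ['#'].isPrefixOf p then (p.drop 1).dropWhile (fun c => c == '#')
    else if ['/', '*'].isPrefixOf p then p.drop 2
    else p
  body.all pvDecorB

-- s.find(w, j) for nonempty w (Python's find; exact for the nonempty needles B uses)
def pvFindFromB (l w : List Char) (j : Nat) : Option Nat :=
  if h : j < l.length then
    if w.isPrefixOf (l.drop j) then some j else pvFindFromB l w (j + 1)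
  else none
termination_by l.length - j

theorem pvFindFromB_some_le (l w : List Char) (j k : Nat)
    (h : pvFindFromB l w j = some k) : j ≤ k ∧ k < l.length := by
  unfold pvFindFromB at h
  split at h
  · split at h
    · cases h; omega
    · have := pvFindFromB_some_le l w (j + 1) k h
      omega
  · cases h
termination_by l.length - j

-- the `for j in occurrences(w): if check(j): return True` loop
def pvScanWordB (l w : List Char) (check : Nat → Bool) (j : Nat) : Bool :=
  match hf : pvFindFromB l w j with
  | none => false
  | some k => check k || pvScanWordB l w check (k + 1)
termination_by l.length - j
decreasing_by
  have := pvFindFromB_some_le l w j k hf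
  omega

-- e >= len(s) or not (s[e].isalnum() or s[e] == "_")
def pvBoundaryB (l : List Char) (e : Nat) : Bool :=
  match l.drop e with
  | [] => true
  | c :: _ => !(PySem.Chars.isalnum c || c == '_')

def pvWordsB : List (List Char) :=
  ["todo".toList, "fixme".toList, "stub".toList, "placeholder".toList,
   "unimplemented".toList, "notimplemented".toList]

def pvPhrasesB : List (List Char) :=
  ["not implemented".toList, "not yet implemented".toList]

def comment_has_stub_markers_alt (text : String) : Bool :=
  let s := PySem.Chars.lower text.toList
  (pvWordsB.any fun w =>
    pvScanWordB s w (fun j => pvBoundaryB s (j + w.length) && pvValidPrefixB (s.take j)) 0)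
  || (pvPhrasesB.any fun w =>
    pvScanWordB s w (fun j => pvValidPrefixB (s.take j)) 0)

-- ===== PRECONDITION & SPEC =====
def Spec_comment_has_stub_markers (text : String) (out : Bool) : Prop := out = comment_has_stub_markers_alt text
instance (text : String) (out : Bool) : Decidable (Spec_comment_has_stub_markers text out) := by unfold Spec_comment_has_stub_markers; infer_instance

-- ===== CLAIM (what is proved, stated in full; the proofs are below) =====
def Claim_equal_comment_has_stub_markers : Prop := ∀ (text : String), Dom_comment_has_stub_markers text → Spec_comment_has_stub_markers text (comment_has_stub_markers text)

-- ===== LEMMAS AND PROOFS =====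

theorem pvSkipA_drop (p : Char → Bool) (l : List Char) (i : Nat) :
    l.drop (pvSkipA p l i) = (l.drop i).dropWhile p := by
  unfold pvSkipA
  split
  · rename_i h
    rw [List.drop_eq_getElem_cons h]
    split
    · rename_i hp
      rw [List.dropWhile_cons_of_pos hp]
      exact pvSkipA_drop p l (i + 1)
    · rename_i hp
      rw [List.dropWhile_cons_of_neg hp, ← List.drop_eq_getElem_cons h]
  · rename_i h
    rw [List.drop_eq_nil_of_le (by omega), List.dropWhile_nil]
termination_by l.length - i

theorem pvStarA_le (l : List Char) (i : Nat) : i ≤ pvStarA l i := by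
  unfold pvStarA
  split
  · split
    · have h1 := pvSkipA_le PySem.Chars.isspace l (i + 1)
      have h2 := pvStarA_le l (pvSkipA PySem.Chars.isspace l (i + 1))
      omega
    · exact Nat.le_refl i
  · exact Nat.le_refl i
termination_by l.length - i
decreasing_by
  have := pvSkipA_le PySem.Chars.isspace l (i + 1)
  omega

theorem pvSkipA_le_length (p : Char → Bool) (l : List Char) (i : Nat)
    (h : i ≤ l.length) : pvSkipA p l i ≤ l.length := by
  unfold pvSkipA
  split
  · split
    · exact pvSkipA_le_length p l (i + 1) (by omega)
    · exact h
  · exact h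
termination_by l.length - i

theorem pvStarA_le_length (l : List Char) (i : Nat)
    (h : i ≤ l.length) : pvStarA l i ≤ l.length := by
  unfold pvStarA
  split
  · split
    · exact pvStarA_le_length l _ (pvSkipA_le_length _ l (i + 1) (by omega))
    · exact h
  · exact h
termination_by l.length - i
decreasing_by
  have := pvSkipA_le PySem.Chars.isspace l (i + 1)
  omega

-- A's whitespace skip followed by the nested star/whitespace loop is one dropWhile over pvDecorB.
theorem pvStarA_drop (l : List Char) (i : Nat) :
    l.drop (pvStarA l (pvSkipA PySem.Chars.isspace l i)) = (l.drop i).dropWhile pvDecorB := by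
  by_cases h : i < l.length
  · rw [List.drop_eq_getElem_cons h]
    by_cases hs : PySem.Chars.isspace l[i] = true
    · rw [List.dropWhile_cons_of_pos (by simp [pvDecorB, hs]),
        show pvSkipA PySem.Chars.isspace l i = pvSkipA PySem.Chars.isspace l (i + 1) by
          rw [pvSkipA]; simp [h, hs]]
      exact pvStarA_drop l (i + 1)
    · have hskip : pvSkipA PySem.Chars.isspace l i = i := by
        rw [pvSkipA]; simp [h, hs]
      rw [hskip]
      by_cases hst : l[i] == '*'
      · rw [List.dropWhile_cons_of_pos (by simp [pvDecorB, hst]),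
          show pvStarA l i = pvStarA l (pvSkipA PySem.Chars.isspace l (i + 1)) by
            rw [pvStarA]; simp [h, hst]]
        exact pvStarA_drop l (i + 1)
      · rw [List.dropWhile_cons_of_neg (by simp [pvDecorB, hst, hs]),
          show pvStarA l i = i by rw [pvStarA]; simp [h, hst],
          ← List.drop_eq_getElem_cons h]
  · have hskip : pvSkipA PySem.Chars.isspace l i = i := by
      rw [pvSkipA]; simp [h]
    rw [hskip, show pvStarA l i = i by rw [pvStarA]; simp [h],
      List.drop_eq_nil_of_le (by omega), List.dropWhile_nil]
termination_by l.length - i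
decreasing_by all_goals omega

theorem dropWhile_head_false (p : Char → Bool) (xs : List Char) (c : Char) (t : List Char)
    (h : xs.dropWhile p = c :: t) : p c = false := by
  induction xs with
  | nil => simp at h
  | cons a xs ih =>
    by_cases hp : p a = true
    · rw [List.dropWhile_cons_of_pos hp] at h
      exact ih h
    · rw [List.dropWhile_cons_of_neg hp] at h
      cases h
      simpa using hp

-- the prefix consumed between i and j by a dropWhile-style loop is the takeWhile
theorem seg_take_eq (p : Char → Bool) (l : List Char) (i j : Nat)
    (hij : i ≤ j) (hjl : j ≤ l.length)
    (h : l.drop j = (l.drop i).dropWhile p) :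
    (l.drop i).take (j - i) = (l.drop i).takeWhile p := by
  have hsplit := List.takeWhile_append_dropWhile (p := p) (l := l.drop i)
  have hlen : ((l.drop i).takeWhile p).length = j - i := by
    have h1 : ((l.drop i).takeWhile p).length + ((l.drop i).dropWhile p).length
        = (l.drop i).length := by
      rw [← List.length_append, hsplit]
    rw [← h] at h1
    simp at h1
    omega
  have hpre : (l.drop i).takeWhile p <+: l.drop i := List.takeWhile_prefix p
  rw [List.prefix_iff_eq_take] at hpre
  rw [hpre, hlen]

theorem seg_elem (p : Char → Bool) (l : List Char) (i j : Nat)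
    (hij : i ≤ j) (hjl : j ≤ l.length)
    (h : l.drop j = (l.drop i).dropWhile p)
    (k : Nat) (hk : k < l.length) (hik : i ≤ k) (hkj : k < j) :
    p l[k] = true := by
  have ht := seg_take_eq p l i j hij hjl h
  have hki : k - i < ((l.drop i).take (j - i)).length := by
    simp
    omega
  have hmem : ((l.drop i).take (j - i))[k - i] ∈ (l.drop i).takeWhile p := by
    rw [← ht]
    exact List.getElem_mem _
  have hget : ((l.drop i).take (j - i))[k - i] = l[k] := by
    rw [List.getElem_take, List.getElem_drop]
    congr 1
    omega
  rw [← hget]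
  exact List.mem_takeWhile_imp hmem

theorem seg_stop (p : Char → Bool) (l : List Char) (i j : Nat)
    (h : l.drop j = (l.drop i).dropWhile p) (hjl : j < l.length) :
    p l[j] = false := by
  rw [List.drop_eq_getElem_cons hjl] at h
  exact dropWhile_head_false p _ _ _ h.symm

theorem pvMarkerA_le_length (l : List Char) : pvMarkerA l ≤ l.length := by
  unfold pvMarkerA
  split
  · rename_i hp
    have : (2 : Nat) ≤ l.length := by
      have := (List.isPrefixOf_iff_prefix.mp hp).length_le
      simpa using this
    exact pvSkipA_le_length _ l 2 this
  split
  · rename_i hp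
    have : (1 : Nat) ≤ l.length := by
      have := (List.isPrefixOf_iff_prefix.mp hp).length_le
      simpa using this
    exact pvSkipA_le_length _ l 1 this
  split
  · rename_i hp
    have h2 : (2 : Nat) ≤ l.length := by
      have := (List.isPrefixOf_iff_prefix.mp hp).length_le
      simpa using this
    split
    · split <;> omega
    · exact h2
  · omega

theorem pvMarkerA_le_strip (l : List Char) : pvMarkerA l ≤ pvStripA l := by
  unfold pvStripA
  have h1 := pvSkipA_le PySem.Chars.isspace l (pvMarkerA l)
  have h2 := pvStarA_le l (pvSkipA PySem.Chars.isspace l (pvMarkerA l))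
  omega

theorem pvStripA_le_length (l : List Char) : pvStripA l ≤ l.length := by
  unfold pvStripA
  exact pvStarA_le_length l _ (pvSkipA_le_length _ l _ (pvMarkerA_le_length l))

theorem pvStrip_drop (l : List Char) :
    l.drop (pvStripA l) = (l.drop (pvMarkerA l)).dropWhile pvDecorB := by
  exact pvStarA_drop l (pvMarkerA l)

theorem pvStrip_elem (l : List Char) (k : Nat) (hk : k < l.length)
    (h1 : pvMarkerA l ≤ k) (h2 : k < pvStripA l) : pvDecorB l[k] = true := by
  exact seg_elem pvDecorB l (pvMarkerA l) (pvStripA l) (pvMarkerA_le_strip l)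
    (pvStripA_le_length l) (pvStrip_drop l) k hk h1 h2

theorem pvStrip_stop (l : List Char) (h : pvStripA l < l.length) :
    pvDecorB l[pvStripA l] = false := by
  exact seg_stop pvDecorB l (pvMarkerA l) (pvStripA l) (pvStrip_drop l) h

theorem dropWhile_append_of_all (p : Char → Bool) (xs ys : List Char)
    (h : xs.all p = true) : (xs ++ ys).dropWhile p = ys.dropWhile p := by
  induction xs with
  | nil => simp
  | cons a xs ih =>
    simp only [List.all_cons, Bool.and_eq_true] at h
    rw [List.cons_append, List.dropWhile_cons_of_pos h.1]
    exact ih h.2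

theorem takeWhile_all (p : Char → Bool) (xs : List Char) :
    (xs.takeWhile p).all p = true := by
  rw [List.all_eq_true]
  intro a ha
  exact List.mem_takeWhile_imp ha

-- dropping a p-run between a and its end r turns the slice [a, j) into the slice [r, j)
theorem marker_run_rewrite (p : Char → Bool) (l : List Char) (a j : Nat)
    (haj : a ≤ j) (hjl : j ≤ l.length) (hrj : pvSkipA p l a ≤ j) :
    ((l.drop a).take (j - a)).dropWhile p = (l.drop (pvSkipA p l a)).take (j - pvSkipA p l a) := by
  have har : a ≤ pvSkipA p l a := pvSkipA_le p l a
  have hdrop : l.drop (pvSkipA p l a) = (l.drop a).dropWhile p := pvSkipA_drop p l a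
  have hrl : pvSkipA p l a ≤ l.length := le_trans hrj hjl
  have htw : (l.drop a).take (pvSkipA p l a - a) = (l.drop a).takeWhile p :=
    seg_take_eq p l a (pvSkipA p l a) har hrl hdrop
  have hsplit : (l.drop a).take (j - a)
      = (l.drop a).take (pvSkipA p l a - a) ++ (l.drop (pvSkipA p l a)).take (j - pvSkipA p l a) := by
    rw [show j - a = (pvSkipA p l a - a) + (j - pvSkipA p l a) by omega, List.take_add]
    congr 2
    rw [List.drop_drop]
    congr 1
    omega
  rw [hsplit, htw, dropWhile_append_of_all p _ _ (takeWhile_all p _)]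
  by_cases hjr : pvSkipA p l a < j
  · have hrlt : pvSkipA p l a < l.length := by omega
    have hstop : p l[pvSkipA p l a] = false := seg_stop p l a (pvSkipA p l a) hdrop hrlt
    rw [List.drop_eq_getElem_cons hrlt,
      show j - pvSkipA p l a = (j - pvSkipA p l a - 1) + 1 by omega, List.take_succ_cons,
      List.dropWhile_cons_of_neg (by simp [hstop])]
  · rw [show j - pvSkipA p l a = 0 by omega]
    simp

-- validity of the decoration body over slice [m, j): true exactly when j is the strip point
theorem decor_body_iff (l : List Char) (m j : Nat) (hj : j < l.length) (hmj : m ≤ j)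
    (hm2 : m ≤ pvStripA l)
    (hseg : ∀ k, (hk : k < l.length) → m ≤ k → k < pvStripA l → pvDecorB l[k] = true)
    (hc : pvDecorB l[j] = false) :
    (((l.drop m).take (j - m)).all pvDecorB = true ↔ j = pvStripA l) := by
  have hlen : ((l.drop m).take (j - m)).length = j - m := by
    simp
    omega
  constructor
  · intro hall
    have hj2 : ¬ j < pvStripA l := by
      intro hlt
      rw [hseg j hj hmj hlt] at hc
      cases hc
    have hj3 : ¬ pvStripA l < j := by
      intro hlt
      have hi2len : pvStripA l < l.length := by omega
      have hidx : pvStripA l - m < ((l.drop m).take (j - m)).length := by omega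
      have hget : ((l.drop m).take (j - m))[pvStripA l - m] = l[pvStripA l] := by
        rw [List.getElem_take, List.getElem_drop]
        congr 1
        omega
      have hmem := List.getElem_mem hidx
      rw [hget] at hmem
      rw [List.all_eq_true] at hall
      have := hall _ hmem
      rw [pvStrip_stop l hi2len] at this
      cases this
    omega
  · intro hje
    rw [List.all_eq_true]
    intro x hx
    obtain ⟨idx, hidx, rfl⟩ := List.mem_iff_getElem.mp hx
    have hget : ((l.drop m).take (j - m))[idx] = l[m + idx]'(by rw [hlen] at hidx; omega) := by
      rw [List.getElem_take, List.getElem_drop]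
    rw [hget]
    exact hseg (m + idx) (by rw [hlen] at hidx; omega) (by omega) (by rw [hlen] at hidx; omega)

theorem prefix_char (w l : List Char) (hw : w.isPrefixOf l = true) (i : Nat)
    (hi : i < w.length) : l[i]? = w[i]? := by
  obtain ⟨u, hu⟩ := List.isPrefixOf_iff_prefix.mp hw
  rw [← hu, List.getElem?_append_left hi]

theorem isPrefixOf_take (w l : List Char) (j : Nat) (hw : w.isPrefixOf l = true)
    (hjw : w.length ≤ j) : w.isPrefixOf (l.take j) = true := by
  rw [List.isPrefixOf_iff_prefix, List.prefix_iff_eq_take] at hw ⊢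
  rw [List.take_take, Nat.min_eq_left hjw]
  exact hw

theorem isPrefixOf_of_take (w l : List Char) (j : Nat)
    (hw : w.isPrefixOf (l.take j) = true) : w.isPrefixOf l = true := by
  rw [List.isPrefixOf_iff_prefix] at hw ⊢
  exact hw.trans (List.take_prefix j l)

-- KEY: a prefix ending at a letter position j validates iff j is exactly A's strip point
theorem pvValid_iff (l : List Char) (j : Nat) (hj : j < l.length)
    (hc : pvDecorB l[j] = false) (h1 : l[j] ≠ '/') (h2 : l[j] ≠ '#') :
    (pvValidPrefixB (l.take j) = true ↔ j = pvStripA l) := by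
  have hA := pvMarkerA_le_strip l
  by_cases hp1 : ['/', '/'].isPrefixOf l = true
  · -- line comment "//"
    have hc0 : l[0]? = some '/' := by rw [prefix_char _ _ hp1 0 (by simp)]; rfl
    have hc1 : l[1]? = some '/' := by rw [prefix_char _ _ hp1 1 (by simp)]; rfl
    have hlen2 : 2 ≤ l.length := by simpa using (List.isPrefixOf_iff_prefix.mp hp1).length_le
    have hj0 : j ≠ 0 := by
      intro h
      subst h
      rw [List.getElem?_eq_getElem hj] at hc0
      exact h1 (by injection hc0)
    have hj1 : j ≠ 1 := by
      intro h
      subst h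
      rw [List.getElem?_eq_getElem hj] at hc1
      exact h1 (by injection hc1)
    have hj2 : 2 ≤ j := by omega
    have hmark : pvMarkerA l = pvSkipA (fun c => c == '/') l 2 := by simp [pvMarkerA, hp1]
    have hrj : pvSkipA (fun c => c == '/') l 2 ≤ j := by
      by_contra hlt
      rw [Nat.not_le] at hlt
      have := seg_elem (fun c => c == '/') l 2 (pvSkipA (fun c => c == '/') l 2)
        (pvSkipA_le _ l 2) (pvSkipA_le_length _ l 2 hlen2) (pvSkipA_drop _ l 2) j hj hj2 hlt
      simp at this
      exact h1 this
    have hdisp : ['/', '/'].isPrefixOf (l.take j) = true :=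
      isPrefixOf_take _ l j hp1 (by simp [hj2])
    unfold pvValidPrefixB
    rw [if_pos hdisp, List.drop_take,
      marker_run_rewrite (fun c => c == '/') l 2 j hj2 (le_of_lt hj) hrj, ← hmark]
    exact decor_body_iff l (pvMarkerA l) j hj (by rw [hmark]; exact hrj) hA
      (fun k hk hmk hks => pvStrip_elem l k hk hmk hks) hc
  · by_cases hp2 : ['#'].isPrefixOf l = true
    · -- hash comment "#"
      have hc0 : l[0]? = some '#' := by rw [prefix_char _ _ hp2 0 (by simp)]; rfl
      have hlen1 : 1 ≤ l.length := by simpa using (List.isPrefixOf_iff_prefix.mp hp2).length_le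
      have hj0 : j ≠ 0 := by
        intro h
        subst h
        rw [List.getElem?_eq_getElem hj] at hc0
        exact h2 (by injection hc0)
      have hj1 : 1 ≤ j := by omega
      have hmark : pvMarkerA l = pvSkipA (fun c => c == '#') l 1 := by
        simp [pvMarkerA, hp1, hp2]
      have hrj : pvSkipA (fun c => c == '#') l 1 ≤ j := by
        by_contra hlt
        rw [Nat.not_le] at hlt
        have := seg_elem (fun c => c == '#') l 1 (pvSkipA (fun c => c == '#') l 1)
          (pvSkipA_le _ l 1) (pvSkipA_le_length _ l 1 hlen1) (pvSkipA_drop _ l 1) j hj hj1 hlt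
        simp at this
        exact h2 this
      have hd1 : ¬ ['/', '/'].isPrefixOf (l.take j) = true := by
        intro hx
        have hq := prefix_char _ _ hx 0 (by simp)
        rw [List.getElem?_take, if_pos (by omega), hc0] at hq
        simp at hq
      have hd2 : ['#'].isPrefixOf (l.take j) = true :=
        isPrefixOf_take _ l j hp2 (by simp [hj1])
      unfold pvValidPrefixB
      rw [if_neg hd1, if_pos hd2, List.drop_take,
        marker_run_rewrite (fun c => c == '#') l 1 j hj1 (le_of_lt hj) hrj, ← hmark]
      exact decor_body_iff l (pvMarkerA l) j hj (by rw [hmark]; exact hrj) hA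
        (fun k hk hmk hks => pvStrip_elem l k hk hmk hks) hc
    · by_cases hp3 : ['/', '*'].isPrefixOf l = true
      · -- block comment "/*"
        have hc0 : l[0]? = some '/' := by rw [prefix_char _ _ hp3 0 (by simp)]; rfl
        have hc1 : l[1]? = some '*' := by rw [prefix_char _ _ hp3 1 (by simp)]; rfl
        have hj0 : j ≠ 0 := by
          intro h
          subst h
          rw [List.getElem?_eq_getElem hj] at hc0
          exact h1 (by injection hc0)
        have hj1 : j ≠ 1 := by
          intro h
          subst h
          rw [List.getElem?_eq_getElem hj] at hc1
          have hstar : l[1] = '*' := by injection hc1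
          rw [hstar] at hc
          simp [pvDecorB] at hc
        have hj2 : 2 ≤ j := by omega
        have hmark : pvMarkerA l
            = if h : 2 < l.length then (if l[2] == '*' then 3 else 2) else 2 := by
          simp [pvMarkerA, hp1, hp2, hp3]
        have hm2le : 2 ≤ pvMarkerA l := by
          rw [hmark]
          split
          · split <;> omega
          · omega
        have hd1 : ¬ ['/', '/'].isPrefixOf (l.take j) = true := by
          intro hx
          have hq := prefix_char _ _ hx 1 (by simp)
          rw [List.getElem?_take, if_pos (by omega), hc1] at hq
          simp at hq
        have hd2 : ¬ ['#'].isPrefixOf (l.take j) = true := by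
          intro hx
          have hq := prefix_char _ _ hx 0 (by simp)
          rw [List.getElem?_take, if_pos (by omega), hc0] at hq
          simp at hq
        have hd3 : ['/', '*'].isPrefixOf (l.take j) = true :=
          isPrefixOf_take _ l j hp3 (by simp [hj2])
        unfold pvValidPrefixB
        rw [if_neg hd1, if_neg hd2, if_pos hd3, List.drop_take]
        refine decor_body_iff l 2 j hj hj2 (le_trans hm2le hA) ?_ hc
        intro k hk h2k hks
        by_cases hkm : pvMarkerA l ≤ k
        · exact pvStrip_elem l k hk hkm hks
        · rw [hmark] at hkm
          by_cases h2l : 2 < l.length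
          · rw [dif_pos h2l] at hkm
            by_cases hst : l[2] == '*'
            · rw [if_pos hst] at hkm
              have hk2 : k = 2 := by omega
              subst hk2
              have hv : l[2] = '*' := by simpa using hst
              simp [pvDecorB, hv]
            · rw [if_neg hst] at hkm
              omega
          · rw [dif_neg h2l] at hkm
            omega
      · -- no comment marker
        have hmark : pvMarkerA l = 0 := by simp [pvMarkerA, hp1, hp2, hp3]
        have hd1 : ¬ ['/', '/'].isPrefixOf (l.take j) = true := fun hx =>
          hp1 (isPrefixOf_of_take _ l j hx)
        have hd2 : ¬ ['#'].isPrefixOf (l.take j) = true := fun hx =>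
          hp2 (isPrefixOf_of_take _ l j hx)
        have hd3 : ¬ ['/', '*'].isPrefixOf (l.take j) = true := fun hx =>
          hp3 (isPrefixOf_of_take _ l j hx)
        unfold pvValidPrefixB
        rw [if_neg hd1, if_neg hd2, if_neg hd3,
          show l.take j = (l.drop 0).take (j - 0) by simp]
        refine decor_body_iff l 0 j hj (Nat.zero_le _) (Nat.zero_le _) ?_ hc
        intro k hk _ hks
        exact pvStrip_elem l k hk (by omega) hks

theorem pvFindFromB_none_spec (l w : List Char) (j0 : Nat) (h : pvFindFromB l w j0 = none)
    (j : Nat) (hj0 : j0 ≤ j) (hjl : j < l.length) : w.isPrefixOf (l.drop j) = false := by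
  unfold pvFindFromB at h
  split at h
  · split at h
    · cases h
    · rename_i hlt hpre
      by_cases hj : j0 = j
      · subst hj
        rw [Bool.eq_false_iff]
        intro hx
        exact hpre hx
      · exact pvFindFromB_none_spec l w (j0 + 1) h j (by omega) hjl
  · rename_i hlt
    omega
termination_by l.length - j0

theorem pvFindFromB_some_spec (l w : List Char) (j0 k : Nat)
    (h : pvFindFromB l w j0 = some k) :
    w.isPrefixOf (l.drop k) = true ∧
      ∀ j, j0 ≤ j → j < k → w.isPrefixOf (l.drop j) = false := by
  unfold pvFindFromB at h
  split at h
  · split at h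
    · rename_i hlt hpre
      cases h
      exact ⟨hpre, fun j hj hjk => by omega⟩
    · rename_i hlt hpre
      have ihs := pvFindFromB_some_spec l w (j0 + 1) k h
      refine ⟨ihs.1, ?_⟩
      intro j hj hjk
      by_cases hje : j = j0
      · subst hje
        rw [Bool.eq_false_iff]
        intro hx
        exact hpre hx
      · exact ihs.2 j (by omega) hjk
  · cases h
termination_by l.length - j0

theorem pvScan_iff (l w : List Char) (check : Nat → Bool) (j0 : Nat) :
    pvScanWordB l w check j0 = true ↔
      ∃ j, j0 ≤ j ∧ j < l.length ∧ w.isPrefixOf (l.drop j) = true ∧ check j = true := by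
  have key : ∀ n j0, l.length - j0 < n →
      (pvScanWordB l w check j0 = true ↔
        ∃ j, j0 ≤ j ∧ j < l.length ∧ w.isPrefixOf (l.drop j) = true ∧ check j = true) := by
    intro n
    induction n with
    | zero => omega
    | succ n ih =>
      intro j0 hn
      rw [pvScanWordB]
      split
      · rename_i heq
        simp only [Bool.false_eq_true, false_iff]
        rintro ⟨j, hj1, hj2, hj3, _⟩
        rw [pvFindFromB_none_spec l w j0 heq j hj1 hj2] at hj3
        cases hj3
      · rename_i k heq
        have hb := pvFindFromB_some_le l w j0 k heq
        have hspec := pvFindFromB_some_spec l w j0 k heq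
        rw [Bool.or_eq_true, ih (k + 1) (by omega)]
        constructor
        · rintro (hck | ⟨j, hj1, hj2, hj3, hj4⟩)
          · exact ⟨k, hb.1, hb.2, hspec.1, hck⟩
          · exact ⟨j, by omega, hj2, hj3, hj4⟩
        · rintro ⟨j, hj1, hj2, hj3, hj4⟩
          by_cases hjk : j = k
          · subst hjk
            exact Or.inl hj4
          · rcases Nat.lt_or_ge j k with hlt | hge
            · rw [hspec.2 j hj1 hlt] at hj3
              cases hj3
            · exact Or.inr ⟨j, by omega, hj2, hj3, hj4⟩
  exact key (l.length - j0 + 1) j0 (by omega)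

-- the scan finds exactly the strip point when the needle starts with a letter
theorem pvScan_at_strip (l w : List Char) (check2 : Nat → Bool) (c0 : Char) (wt : List Char)
    (hw : w = c0 :: wt) (hd : pvDecorB c0 = false) (h1 : c0 ≠ '/') (h2 : c0 ≠ '#') :
    pvScanWordB l w (fun j => check2 j && pvValidPrefixB (l.take j)) 0
      = (w.isPrefixOf (l.drop (pvStripA l)) && check2 (pvStripA l)) := by
  rw [Bool.eq_iff_iff, pvScan_iff, Bool.and_eq_true]
  constructor
  · rintro ⟨j, _, hjlen, hpre, hck⟩
    obtain ⟨u, hu⟩ := List.isPrefixOf_iff_prefix.mp hpre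
    rw [hw, List.drop_eq_getElem_cons hjlen] at hu
    have hlj : l[j] = c0 := by
      have := (List.cons.injEq _ _ _ _).mp hu
      exact this.1.symm
    rw [Bool.and_eq_true] at hck
    have hvj : j = pvStripA l :=
      (pvValid_iff l j hjlen (by rw [hlj]; exact hd) (by rw [hlj]; exact h1)
        (by rw [hlj]; exact h2)).mp hck.2
    rw [← hvj]
    exact ⟨hpre, hck.1⟩
  · rintro ⟨hpre, hck⟩
    have hne : l.drop (pvStripA l) ≠ [] := by
      obtain ⟨u, hu⟩ := List.isPrefixOf_iff_prefix.mp hpre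
      rw [← hu, hw]
      simp
    have hi2len : pvStripA l < l.length := by
      by_contra hge
      exact hne (List.drop_eq_nil_of_le (by omega))
    obtain ⟨u, hu⟩ := List.isPrefixOf_iff_prefix.mp hpre
    rw [hw, List.drop_eq_getElem_cons hi2len] at hu
    have hlj : l[pvStripA l] = c0 := ((List.cons.injEq _ _ _ _).mp hu).1.symm
    have hvalid : pvValidPrefixB (l.take (pvStripA l)) = true :=
      (pvValid_iff l (pvStripA l) hi2len (by rw [hlj]; exact hd) (by rw [hlj]; exact h1)
        (by rw [hlj]; exact h2)).mpr rfl
    exact ⟨pvStripA l, Nat.zero_le _, hi2len, hpre, by rw [Bool.and_eq_true]; exact ⟨hck, hvalid⟩⟩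

theorem pvStartsWithWordA_eq (l : List Char) (i : Nat) (w : List Char) :
    pvStartsWithWordA l i w = (w.isPrefixOf (l.drop i) && pvBoundaryB l (i + w.length)) := by
  unfold pvStartsWithWordA pvBoundaryB pvIsWordA
  cases hp : w.isPrefixOf (l.drop i)
  · simp
  · simp only [if_pos, Bool.true_and]

-- the port-B scan loops, specialised to the two checks Source B uses
theorem pvScan_word (l w : List Char) (c0 : Char) (wt : List Char)
    (hw : w = c0 :: wt) (hd : pvDecorB c0 = false) (h1 : c0 ≠ '/') (h2 : c0 ≠ '#') :
    pvScanWordB l w (fun j => pvBoundaryB l (j + w.length) && pvValidPrefixB (l.take j)) 0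
      = (w.isPrefixOf (l.drop (pvStripA l)) && pvBoundaryB l (pvStripA l + w.length)) := by
  have := pvScan_at_strip l w (fun j => pvBoundaryB l (j + w.length)) c0 wt hw hd h1 h2
  simpa using this

theorem pvScan_phrase (l w : List Char) (c0 : Char) (wt : List Char)
    (hw : w = c0 :: wt) (hd : pvDecorB c0 = false) (h1 : c0 ≠ '/') (h2 : c0 ≠ '#') :
    pvScanWordB l w (fun j => pvValidPrefixB (l.take j)) 0
      = w.isPrefixOf (l.drop (pvStripA l)) := by
  have h := pvScan_at_strip l w (fun _ => true) c0 wt hw hd h1 h2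
  simp only [Bool.true_and, Bool.and_true] at h
  exact h

-- ===== VERDICT (by name: the statement is the Claim_ definition above) =====
theorem comment_has_stub_markers_spec : Claim_equal_comment_has_stub_markers := by
  intro text _
  unfold Spec_comment_has_stub_markers comment_has_stub_markers comment_has_stub_markers_alt
  simp only [pvWordsB, pvPhrasesB, List.any_cons, List.any_nil, Bool.or_false]
  generalize PySem.Chars.lower text.toList = l
  rw [pvScan_word l "todo".toList 't' "odo".toList rfl (by decide) (by decide) (by decide),
    pvScan_word l "fixme".toList 'f' "ixme".toList rfl (by decide) (by decide) (by decide),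
    pvScan_word l "stub".toList 's' "tub".toList rfl (by decide) (by decide) (by decide),
    pvScan_word l "placeholder".toList 'p' "laceholder".toList rfl (by decide) (by decide) (by decide),
    pvScan_word l "unimplemented".toList 'u' "nimplemented".toList rfl (by decide) (by decide) (by decide),
    pvScan_word l "notimplemented".toList 'n' "otimplemented".toList rfl (by decide) (by decide) (by decide),
    pvScan_phrase l "not implemented".toList 'n' "ot implemented".toList rfl (by decide) (by decide) (by decide),
    pvScan_phrase l "not yet implemented".toList 'n' "ot yet implemented".toList rfl (by decide) (by decide) (by decide)]
  simp only [pvStartsWithWordA_eq]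
  cases h1 : "todo".toList.isPrefixOf (l.drop (pvStripA l)) &&
      pvBoundaryB l (pvStripA l + "todo".toList.length) <;>
    cases h2 : "fixme".toList.isPrefixOf (l.drop (pvStripA l)) &&
      pvBoundaryB l (pvStripA l + "fixme".toList.length) <;>
    cases h3 : "stub".toList.isPrefixOf (l.drop (pvStripA l)) &&
      pvBoundaryB l (pvStripA l + "stub".toList.length) <;>
    cases h4 : "placeholder".toList.isPrefixOf (l.drop (pvStripA l)) &&
      pvBoundaryB l (pvStripA l + "placeholder".toList.length) <;>
    cases h5 : "unimplemented".toList.isPrefixOf (l.drop (pvStripA l)) &&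
      pvBoundaryB l (pvStripA l + "unimplemented".toList.length) <;>
    cases h6 : "notimplemented".toList.isPrefixOf (l.drop (pvStripA l)) &&
      pvBoundaryB l (pvStripA l + "notimplemented".toList.length) <;>
    cases h7 : "not implemented".toList.isPrefixOf (l.drop (pvStripA l)) <;>
    cases h8 : "not yet implemented".toList.isPrefixOf (l.drop (pvStripA l)) <;>
    simp_all
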